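-- pv_equiv track=rewrite | github.com/JaemT1/laboratorio01tlf | lab01.py | interseccionConjuntosLista
-- ===== SOURCE A (Python) =====
-- def interseccionConjuntosLista(conjuntosLista):
--     conjuntoIntersecion = list (conjuntosLista[0])
--     resultado = []
--     for u in range (len(conjuntoIntersecion)):
--         elemento = conjuntoIntersecion[u]
--         verdad = True
--         for p in range(1, len(conjuntosLista)):
--             if elemento not in conjuntosLista[p]:
--                 verdad = False
--                 break
--
--         if verdad:
--             resultado.append(elemento)
--     return resultado
-- ===== SOURCE B (Python) =====
-- def interseccionConjuntosLista(conjuntosLista):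
--     # Build the common-element set once (fold of set intersections), then one
--     # order/duplicate-preserving filter pass over the first collection.
--     common = set(conjuntosLista[0])
--     for c in conjuntosLista[1:]:
--         common &= set(c)
--     return [x for x in conjuntosLista[0] if x in common]
-- ===== Notes on version B (the rewrite author's own statement) =====
-- stated objective: alternative
-- what changed: Builds the intersection as a hash set once (fold of set intersections over the remaining collections) and then filters the first list in one pass, instead of rescanning every other collection for each element of the first list.
import Mathlib
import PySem

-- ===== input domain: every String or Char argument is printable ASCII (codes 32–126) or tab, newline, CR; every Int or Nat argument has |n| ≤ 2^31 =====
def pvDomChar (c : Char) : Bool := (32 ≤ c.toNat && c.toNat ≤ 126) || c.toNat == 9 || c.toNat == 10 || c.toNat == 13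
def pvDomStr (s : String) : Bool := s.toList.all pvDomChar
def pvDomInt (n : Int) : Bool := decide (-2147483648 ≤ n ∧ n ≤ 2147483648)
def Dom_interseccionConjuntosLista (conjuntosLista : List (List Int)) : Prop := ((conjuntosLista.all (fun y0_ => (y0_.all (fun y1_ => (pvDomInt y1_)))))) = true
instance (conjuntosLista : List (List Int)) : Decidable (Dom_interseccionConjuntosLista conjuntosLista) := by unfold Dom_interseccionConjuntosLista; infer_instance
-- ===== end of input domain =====

-- B replaces A's per-element rescan of every other collection by one up-front fold
-- of set intersections followed by a single order-preserving filter pass (alternative algorithm).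

-- ===== PORT A =====
def interseccionConjuntosLista (conjuntosLista : List (List Int)) : List Int :=
  match PySem.List.pyGet? conjuntosLista 0 with
  | none => []  -- unreachable under Pre_ (Python raises IndexError on [])
  | some conjuntoIntersecion =>
    (List.range conjuntoIntersecion.length).foldl (fun resultado u =>
      let elemento := conjuntoIntersecion.getD u 0
      let verdad := (PySem.List.pyRange 1 (conjuntosLista.length : Int) 1).all
        (fun p => decide (elemento ∈ PySem.List.pyGetD conjuntosLista p []))
      if verdad then resultado ++ [elemento] else resultado) []

-- ===== PORT B =====
def interseccionConjuntosLista_alt (conjuntosLista : List (List Int)) : List Int :=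
  match PySem.List.pyGet? conjuntosLista 0 with
  | none => []  -- unreachable under Pre_ (Python raises IndexError on [])
  | some first =>
    let common : PySem.Set Int :=
      (conjuntosLista.drop 1).foldl
        (fun acc c => PySem.Set.inter acc (PySem.Set.ofList c))
        (PySem.Set.ofList first)
    first.filter (fun x => decide (x ∈ common))

-- ===== PRECONDITION & SPEC =====
-- Pre_ excludes only the empty argument, on which Python A raises IndexError.
def Pre_interseccionConjuntosLista (conjuntosLista : List (List Int)) : Prop :=
  conjuntosLista ≠ []
instance (conjuntosLista : List (List Int)) : Decidable (Pre_interseccionConjuntosLista conjuntosLista) := by unfold Pre_interseccionConjuntosLista; infer_instance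
def pvWitness_interseccionConjuntosLista : List (List Int) := [[1, 2, 2, 3], [2, 3], [3, 2]]
def Spec_interseccionConjuntosLista (conjuntosLista : List (List Int)) (out : List Int) : Prop := out = interseccionConjuntosLista_alt conjuntosLista
instance (conjuntosLista : List (List Int)) (out : List Int) : Decidable (Spec_interseccionConjuntosLista conjuntosLista out) := by unfold Spec_interseccionConjuntosLista; infer_instance

-- ===== CLAIM (what is proved, stated in full; the proofs are below) =====
def Claim_equal_interseccionConjuntosLista : Prop := ∀ (conjuntosLista : List (List Int)), Dom_interseccionConjuntosLista conjuntosLista → Pre_interseccionConjuntosLista conjuntosLista → Spec_interseccionConjuntosLista conjuntosLista (interseccionConjuntosLista conjuntosLista)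

-- ===== LEMMAS AND PROOFS =====

-- A's indexed append-if loop over the first list is a filter of that list.
theorem pv_foldl_range_filter (p : Int → Bool) (xs : List Int) (acc : List Int) :
    (List.range xs.length).foldl (fun r u => if p (xs.getD u 0) then r ++ [xs.getD u 0] else r) acc
      = acc ++ xs.filter p := by
  induction xs using List.reverseRecOn generalizing acc with
  | nil => simp
  | append_singleton ys y ih =>
    have hlen : (ys ++ [y]).length = ys.length + 1 := by simp
    rw [hlen, List.range_succ, List.foldl_append]
    have hstep : (List.range ys.length).foldl
        (fun r u => if p ((ys ++ [y]).getD u 0) then r ++ [(ys ++ [y]).getD u 0] else r) acc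
        = (List.range ys.length).foldl
        (fun r u => if p (ys.getD u 0) then r ++ [ys.getD u 0] else r) acc := by
      apply PySem.List.foldl_congr_mem
      intro r u hu
      have hu' : u < ys.length := List.mem_range.mp hu
      have : (ys ++ [y]).getD u 0 = ys.getD u 0 := by
        simp [List.getD, List.getElem?_append_left hu']
      rw [this]
    have hlast : (ys ++ [y]).getD ys.length 0 = y := by
      simp [List.getD]
    rw [hstep, ih]
    simp only [List.foldl_cons, List.foldl_nil, hlast, List.filter_append]
    split_ifs with h <;> simp [List.filter, h]

-- membership in the folded intersection set
theorem pv_mem_foldl_inter (rest : List (List Int)) (acc : PySem.Set Int) (x : Int) :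
    x ∈ rest.foldl (fun a c => PySem.Set.inter a (PySem.Set.ofList c)) acc
      ↔ x ∈ acc ∧ ∀ c ∈ rest, x ∈ c := by
  induction rest generalizing acc with
  | nil => simp
  | cons c rest ih =>
    simp [ih, PySem.Set.mem_inter, PySem.Set.mem_ofList]
    tauto

-- ===== VERDICT (by name: the statement is the Claim_ definition above) =====
theorem interseccionConjuntosLista_spec : Claim_equal_interseccionConjuntosLista := by
  intro cl _ hpre
  unfold Spec_interseccionConjuntosLista interseccionConjuntosLista interseccionConjuntosLista_alt
  obtain ⟨first, rest, rfl⟩ : ∃ f r, cl = f :: r := by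
    cases cl with
    | nil => exact absurd rfl hpre
    | cons f r => exact ⟨f, r, rfl⟩
  have hget : PySem.List.pyGet? (first :: rest) 0 = some first :=
    PySem.List.pyGet?_zero_cons first rest
  rw [hget]
  dsimp only
  rw [pv_foldl_range_filter
    (fun e => (PySem.List.pyRange 1 ((first :: rest).length : Int) 1).all
      (fun p => decide (e ∈ PySem.List.pyGetD (first :: rest) p []))) first []]
  simp only [List.nil_append, List.drop_one, List.tail_cons]
  apply List.filter_congr
  intro x hx
  have hall : (PySem.List.pyRange 1 ((first :: rest).length : Int) 1).all
      (fun p => decide (x ∈ PySem.List.pyGetD (first :: rest) p []))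
      = rest.all (fun c => decide (x ∈ c)) := by
    have hmap := PySem.List.map_pyGetD_pyRange' (first :: rest) ([] : List Int)
      (a := 1) (by norm_num)
    calc (PySem.List.pyRange 1 ((first :: rest).length : Int) 1).all
          (fun p => decide (x ∈ PySem.List.pyGetD (first :: rest) p []))
        = ((PySem.List.pyRange 1 ((first :: rest).length : Int) 1).map
            (fun p => PySem.List.pyGetD (first :: rest) p [])).all
            (fun c => decide (x ∈ c)) := by rw [List.all_map]; rfl
      _ = rest.all (fun c => decide (x ∈ c)) := by rw [hmap]; norm_num
  rw [hall]
  have hmem := pv_mem_foldl_inter rest (PySem.Set.ofList first) x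
  by_cases h : ∀ c ∈ rest, x ∈ c
  · have : x ∈ rest.foldl (fun a c => PySem.Set.inter a (PySem.Set.ofList c))
        (PySem.Set.ofList first) := hmem.mpr ⟨(PySem.Set.mem_ofList first x).mpr hx, h⟩
    simp [this, List.all_eq_true]
    exact h
  · have : x ∉ rest.foldl (fun a c => PySem.Set.inter a (PySem.Set.ofList c))
        (PySem.Set.ofList first) := fun hc => h (hmem.mp hc).2
    simp [this]
    push Not at h
    exact h
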